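-- pv_equiv track=rewrite | github.com/isabellenovais8/desenvolve-python-basico | modulo7/aula1_questao5.py | cont_vogais
-- ===== SOURCE A (Python) =====
-- def cont_vogais(x):
--     vogais = "aeiou"
--     vogais_contador = 0
--     indice = {}
--
--     for index, char in enumerate(x.lower()):
--         if char in vogais:
--             vogais_contador += 1
--             if char in indice:
--                 indice[char].append(index)
--             else:
--                 indice[char] = [index]
--
--     return vogais_contador, indice
-- ===== SOURCE B (Python) =====
-- def cont_vogais(x):
--     low = x.lower()
--     seen = list(dict.fromkeys(c for c in low if c in "aeiou"))
--     indice = {v: [i for i, c in enumerate(low) if c == v] for v in seen}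
--     return sum(len(l) for l in indice.values()), indice
-- ===== Notes on version B (the rewrite author's own statement) =====
-- stated objective: alternative
-- what changed: B replaces A's single-pass per-character dispatch into a growing dict by a three-stage pipeline: dedup the vowels in order of first appearance, build each vowel's index list with its own enumerate-scan, and obtain the count as the sum of the list lengths.
import Mathlib
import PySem

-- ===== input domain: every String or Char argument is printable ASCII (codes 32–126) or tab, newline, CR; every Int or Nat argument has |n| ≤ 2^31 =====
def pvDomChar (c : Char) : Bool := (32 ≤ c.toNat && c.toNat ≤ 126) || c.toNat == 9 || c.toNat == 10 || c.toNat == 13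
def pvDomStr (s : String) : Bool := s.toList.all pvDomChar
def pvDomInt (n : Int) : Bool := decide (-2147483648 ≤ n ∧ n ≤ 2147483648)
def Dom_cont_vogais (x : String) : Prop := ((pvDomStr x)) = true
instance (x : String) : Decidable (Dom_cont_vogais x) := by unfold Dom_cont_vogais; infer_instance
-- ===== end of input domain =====

-- B rebuilds the result as a pipeline — dedup the vowels by first appearance, one index scan
-- per distinct vowel, count = sum of the list lengths — instead of A's per-character dispatch
-- into a growing dict (objective: alternative decomposition, same linear cost).

-- ===== PORT A =====
-- the literal "aeiou" as a char list (a 1-char string is in "aeiou" iff its char is in this list)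
def pvVowels : List Char := ['a', 'e', 'i', 'o', 'u']

-- one step of A's loop body, state = (vogais_contador, indice)
def pvStepA (st : Int × PySem.Dict String (List Int)) (p : Int × Char) :
    Int × PySem.Dict String (List Int) :=
  if p.2 ∈ pvVowels then
    (st.1 + 1,
      if st.2.contains (String.ofList [p.2]) then
        st.2.modify (String.ofList [p.2]) [] (· ++ [p.1])   -- indice[char].append(index)
      else
        st.2.insert (String.ofList [p.2]) [p.1])            -- indice[char] = [index]
  else st

def cont_vogais (x : String) : Int × (List (String × List Int)) :=
  let r := (PySem.List.enumerate (PySem.Str.lower x).toList 0).foldl pvStepA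
             (0, PySem.Dict.empty)
  (r.1, r.2.items)

-- ===== PORT B =====
-- [i for i, c in enumerate(low) if c == v]
def pvIdxs (low : List Char) (v : Char) : List Int :=
  ((PySem.List.enumerate low 0).filter (fun p => p.2 == v)).map (·.1)

def cont_vogais_alt (x : String) : Int × (List (String × List Int)) :=
  let low := (PySem.Str.lower x).toList
  let seen := PySem.List.dedup (low.filter (fun c => c ∈ pvVowels))
  let indice := seen.map (fun v => (String.ofList [v], pvIdxs low v))
  ((indice.map (fun p => (p.2.length : Int))).sum, indice)

-- ===== PRECONDITION & SPEC =====
def Spec_cont_vogais (x : String) (out : Int × (List (String × List Int))) : Prop := out = cont_vogais_alt x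
instance (x : String) (out : Int × (List (String × List Int))) : Decidable (Spec_cont_vogais x out) := by unfold Spec_cont_vogais; infer_instance

-- ===== CLAIM (what is proved, stated in full; the proofs are below) =====
def Claim_equal_cont_vogais : Prop := ∀ (x : String), Dom_cont_vogais x → Spec_cont_vogais x (cont_vogais x)

-- ===== LEMMAS AND PROOFS =====

-- the items list B builds for a given char list
def pvItems (l : List Char) : List (String × List Int) :=
  (PySem.List.dedup (l.filter (fun c => c ∈ pvVowels))).map
    (fun v => (String.ofList [v], pvIdxs l v))

lemma pvMk_inj {a b : Char} (h : String.ofList [a] = String.ofList [b]) : a = b := by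
  simpa using congrArg String.toList h

lemma pvDedup_snoc {α : Type} [BEq α] [LawfulBEq α] (xs : List α) (c : α) :
    PySem.List.dedup (xs ++ [c]) =
      if c ∈ xs then PySem.List.dedup xs else PySem.List.dedup xs ++ [c] := by
  simp only [PySem.List.dedup_eq_ofList, PySem.Set.ofList_eq_foldl, List.foldl_append,
    List.foldl_cons, List.foldl_nil]
  rw [← PySem.Set.ofList_eq_foldl]
  by_cases h : c ∈ xs
  · simp [PySem.Set.add, PySem.Set.contains, h, PySem.Set.mem_ofList]
  · simp [PySem.Set.add, PySem.Set.contains, h, PySem.Set.mem_ofList]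

lemma pvIdxs_snoc (l : List Char) (c v : Char) :
    pvIdxs (l ++ [c]) v =
      pvIdxs l v ++ (if c = v then [(l.length : Int)] else []) := by
  unfold pvIdxs
  rw [PySem.List.enumerate_append]
  simp only [List.filter_append, List.map_append]
  by_cases h : c = v
  · simp [PySem.List.enumerate, h]
  · simp [PySem.List.enumerate, h]

lemma pvIdxs_nil_of_not_mem {l : List Char} {c : Char} (h : c ∉ l) : pvIdxs l c = [] := by
  unfold pvIdxs
  rw [List.filter_eq_nil_iff.mpr, List.map_nil]
  intro p hp
  rw [PySem.List.mem_enumerate_iff] at hp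
  obtain ⟨k, hk, rfl⟩ := hp
  simp only [beq_iff_eq]
  exact fun e => h (e ▸ List.getElem_mem hk)

lemma pvSum_update {s : List Char} {c : Char} (hnd : s.Nodup) (hc : c ∈ s)
    (f g : Char → Int) (hg : ∀ v ∈ s, g v = if v = c then f v + 1 else f v) :
    (s.map g).sum = (s.map f).sum + 1 := by
  induction s with
  | nil => simp at hc
  | cons a s ih =>
    rcases List.nodup_cons.mp hnd with ⟨ha, hnd'⟩
    simp only [List.map_cons, List.sum_cons]
    rcases List.mem_cons.mp hc with rfl | hcs
    · have hga : g c = f c + 1 := by simpa using hg c (List.mem_cons_self)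
      have : ∀ v ∈ s, g v = f v := by
        intro v hv
        have := hg v (List.mem_cons_of_mem _ hv)
        rw [this, if_neg]
        exact fun e => ha (e ▸ hv)
      rw [hga, List.map_congr_left this]
      ring
    · have hga : g a = f a := by
        have := hg a (List.mem_cons_self)
        rw [this, if_neg]
        exact fun e => ha (e ▸ hcs)
      have := ih hnd' hcs (fun v hv => hg v (List.mem_cons_of_mem _ hv))
      rw [hga, this]
      ring

lemma pvMain (l : List Char) :
    (PySem.List.enumerate l 0).foldl pvStepA (0, PySem.Dict.empty) =
      (((pvItems l).map (fun p => (p.2.length : Int))).sum, PySem.Dict.mk (pvItems l)) := by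
  induction l using List.reverseRecOn with
  | nil => rfl
  | append_singleton l c ih =>
    rw [PySem.List.enumerate_append, List.foldl_append, ih,
      PySem.List.enumerate_cons, PySem.List.enumerate_nil]
    simp only [List.foldl_cons, List.foldl_nil, zero_add]
    have hinj : Function.Injective (fun v : Char => String.ofList [v]) :=
      fun a b h => pvMk_inj h
    have hkeys : (PySem.Dict.mk (pvItems l)).keys =
        (PySem.List.dedup (l.filter (fun c => c ∈ pvVowels))).map
          (fun v => String.ofList [v]) := by
      show (pvItems l).map (·.1) = _
      rw [pvItems, List.map_map]
      rfl
    have hndkeys : (PySem.Dict.mk (pvItems l)).keys.Nodup := by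
      rw [hkeys]
      exact (PySem.List.nodup_dedup _).map hinj
    by_cases hv : c ∈ pvVowels
    · have hfil : (l ++ [c]).filter (fun c => decide (c ∈ pvVowels)) =
          l.filter (fun c => decide (c ∈ pvVowels)) ++ [c] := by
        simp [List.filter_append, hv]
      by_cases hcl : c ∈ l
      · -- repeated vowel: A appends to the existing entry
        have hcseen : c ∈ PySem.List.dedup (l.filter (fun c => c ∈ pvVowels)) := by
          rw [PySem.List.mem_dedup, List.mem_filter]
          exact ⟨hcl, by simpa using hv⟩
        have hseen_eq : PySem.List.dedup ((l ++ [c]).filter (fun c => c ∈ pvVowels)) =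
            PySem.List.dedup (l.filter (fun c => c ∈ pvVowels)) := by
          rw [hfil, pvDedup_snoc, if_pos]
          rw [List.mem_filter]
          exact ⟨hcl, by simpa using hv⟩
        have hcont : (PySem.Dict.mk (pvItems l)).contains (String.ofList [c]) = true := by
          rw [PySem.Dict.contains_eq_decide_mem_keys, hkeys]
          simp only [decide_eq_true_eq]
          exact List.mem_map_of_mem hcseen
        have hmem_items : (String.ofList [c], pvIdxs l c) ∈ pvItems l :=
          List.mem_map_of_mem hcseen
        have hgetD : (PySem.Dict.mk (pvItems l)).getD (String.ofList [c]) [] = pvIdxs l c :=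
          PySem.Dict.getD_of_mem_items _ hmem_items hndkeys []
        simp only [pvStepA, if_pos hv, hcont, if_pos, PySem.Dict.modify, hgetD]
        refine Prod.ext ?_ ?_
        · show _ + 1 = _
          have hmap : ∀ L : List Char, (pvItems L).map (fun p => (p.2.length : Int)) =
              (PySem.List.dedup (L.filter (fun c => c ∈ pvVowels))).map
                (fun v => ((pvIdxs L v).length : Int)) := by
            intro L; rw [pvItems, List.map_map]; rfl
          rw [hmap, hmap, hseen_eq,
            pvSum_update (PySem.List.nodup_dedup _) hcseen
              (fun v => ((pvIdxs l v).length : Int))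
              (fun v => ((pvIdxs (l ++ [c]) v).length : Int)) ?_]
          intro v _
          simp only [pvIdxs_snoc]
          by_cases hvc : v = c
          · simp [hvc]
          · rw [if_neg (show ¬ c = v from fun h => hvc h.symm), List.append_nil, if_neg hvc]
        · show PySem.Dict.insert _ _ _ = _
          apply PySem.Dict.ext
          rw [PySem.Dict.items_insert_of_contains _ _ hcont]
          show ((pvItems l).map _) = (PySem.Dict.mk (pvItems (l ++ [c]))).items
          show ((pvItems l).map _) = pvItems (l ++ [c])
          rw [pvItems, pvItems, hseen_eq, List.map_map]
          apply List.map_congr_left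
          intro v hvseen
          by_cases hvc : v = c
          · subst hvc
            simp only [Function.comp_apply, beq_self_eq_true, if_pos]
            rw [pvIdxs_snoc, if_pos rfl]
          · have hne : (String.ofList [v] == String.ofList [c]) = false := by
              simp only [beq_eq_false_iff_ne, ne_eq]
              exact fun h => hvc (pvMk_inj h)
            simp only [Function.comp_apply, hne, Bool.false_eq_true, if_false]
            rw [pvIdxs_snoc, if_neg (fun h => hvc h.symm), List.append_nil]
      · -- first occurrence of this vowel: A appends a fresh entry
        have hcseen : c ∉ PySem.List.dedup (l.filter (fun c => c ∈ pvVowels)) := by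
          rw [PySem.List.mem_dedup, List.mem_filter]
          exact fun h => hcl h.1
        have hseen_eq : PySem.List.dedup ((l ++ [c]).filter (fun c => c ∈ pvVowels)) =
            PySem.List.dedup (l.filter (fun c => c ∈ pvVowels)) ++ [c] := by
          rw [hfil, pvDedup_snoc, if_neg]
          rw [List.mem_filter]
          exact fun h => hcl h.1
        have hcont : (PySem.Dict.mk (pvItems l)).contains (String.ofList [c]) = false := by
          rw [PySem.Dict.contains_eq_decide_mem_keys, hkeys]
          simp only [decide_eq_false_iff_not]
          intro hmem
          obtain ⟨w, hw, hwc⟩ := List.mem_map.mp hmem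
          exact hcseen (pvMk_inj hwc ▸ hw)
        simp only [pvStepA, if_pos hv, hcont, Bool.false_eq_true, if_false]
        have htail : pvIdxs (l ++ [c]) c = [(l.length : Int)] := by
          rw [pvIdxs_snoc, if_pos rfl, pvIdxs_nil_of_not_mem hcl, List.nil_append]
        have hItems : pvItems (l ++ [c]) =
            pvItems l ++ [(String.ofList [c], [(l.length : Int)])] := by
          rw [pvItems, pvItems, hseen_eq, List.map_append]
          congr 1
          · apply List.map_congr_left
            intro v hvseen
            have hvl : v ∈ l := by
              rw [PySem.List.mem_dedup, List.mem_filter] at hvseen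
              exact hvseen.1
            rw [pvIdxs_snoc, if_neg (show ¬ c = v by intro h; subst h; exact hcl hvl),
              List.append_nil]
          · simp [htail]
        refine Prod.ext ?_ ?_
        · show _ + 1 = _
          rw [hItems, List.map_append, List.sum_append]
          simp
        · show PySem.Dict.insert _ _ _ = _
          apply PySem.Dict.ext
          rw [PySem.Dict.items_insert_of_not_contains _ _ hcont]
          show pvItems l ++ _ = pvItems (l ++ [c])
          rw [hItems]
    · -- not a vowel: the state is unchanged
      have hfil : (l ++ [c]).filter (fun c => decide (c ∈ pvVowels)) =
          l.filter (fun c => decide (c ∈ pvVowels)) := by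
        simp [List.filter_append, hv]
      have hItems : pvItems (l ++ [c]) = pvItems l := by
        rw [pvItems, pvItems, hfil]
        apply List.map_congr_left
        intro v hvseen
        have hvv : v ∈ pvVowels := by
          rw [PySem.List.mem_dedup, List.mem_filter] at hvseen
          simpa using hvseen.2
        rw [pvIdxs_snoc, if_neg (show ¬ c = v by intro h; subst h; exact hv hvv),
          List.append_nil]
      simp only [pvStepA, hv, if_false]
      rw [hItems]

-- ===== VERDICT (by name: the statement is the Claim_ definition above) =====
theorem cont_vogais_spec : Claim_equal_cont_vogais := by
  intro x _
  show _ = _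
  unfold cont_vogais cont_vogais_alt
  rw [pvMain]
  rfl
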